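-- pv_equiv track=rewrite | github.com/larwinj/SmartCliff-Training | Strings&DataStructures/Program-18.py | find
-- ===== SOURCE A (Python) =====
-- from collections import Counter
--
-- def find(dictionary, charset):
--     # Storing the frequency of the char
--     charset_count = Counter(charset)
--     result = []
--
--     for word in dictionary:
--         # storing the frequency of the characters in current word
--
--         word_count = Counter(word)
--         valid = True
--         for ch in word_count:
--             if word_count[ch] > charset_count.get(ch, 0):
--                 valid = False
--                 break
--         if valid:
--             result.append(word)
--     return result
-- ===== SOURCE B (Python) =====
-- from collections import Counter
--
-- def find(dictionary, charset):
--     available = Counter(charset)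
--     result = []
--     for word in dictionary:
--         # sort the word, then walk it as runs of equal characters,
--         # comparing each run length against the available count
--         ws = sorted(word)
--         ok = True
--         j = 0
--         while j < len(ws):
--             k = j
--             while k < len(ws) and ws[k] == ws[j]:
--                 k += 1
--             if k - j > available.get(ws[j], 0):
--                 ok = False
--                 break
--             j = k
--         if ok:
--             result.append(word)
--     return result
-- ===== Notes on version B (the rewrite author's own statement) =====
-- stated objective: alternative
-- what changed: Keeps the charset Counter but drops the per-word Counter and its key-comparison loop: B sorts each word and walks it run by run with a two-index scan, comparing each run of equal characters against the available count (avoids building a hash Counter per word).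
import Mathlib
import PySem

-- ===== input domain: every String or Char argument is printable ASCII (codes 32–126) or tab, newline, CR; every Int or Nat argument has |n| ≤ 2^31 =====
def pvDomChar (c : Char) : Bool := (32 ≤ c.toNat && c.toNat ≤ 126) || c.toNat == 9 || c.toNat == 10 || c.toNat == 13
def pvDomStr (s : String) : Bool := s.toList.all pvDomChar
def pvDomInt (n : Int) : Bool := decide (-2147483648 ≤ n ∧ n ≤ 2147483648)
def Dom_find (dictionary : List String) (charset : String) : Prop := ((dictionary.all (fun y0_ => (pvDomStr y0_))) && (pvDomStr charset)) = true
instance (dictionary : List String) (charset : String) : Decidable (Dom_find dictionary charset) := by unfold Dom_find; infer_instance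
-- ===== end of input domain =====

-- B replaces A's per-word Counter and key-comparison loop by sorting each word and
-- comparing its runs of equal characters against the charset counts (alternative algorithm, same results).

-- ===== PORT A =====
-- inner 'for ch in word_count: if word_count[ch] > charset_count.get(ch, 0): valid = False; break'
def findCheckKeys (wc cc : PySem.Dict Char Int) : List Char → Bool
  | [] => true
  | ch :: rest =>
    if wc.getD ch 0 > cc.getD ch 0 then false else findCheckKeys wc cc rest

def find (dictionary : List String) (charset : String) : List String :=
  let charset_count := PySem.Dict.counter charset.toList
  dictionary.foldl (fun result word =>
    let word_count := PySem.Dict.counter word.toList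
    let valid := findCheckKeys word_count charset_count word_count.keys
    if valid then result ++ [word] else result) []

-- ===== PORT B =====
-- the two index loops 'while j < len(ws): k = j; while k < len(ws) and ws[k] == ws[j]: …'
-- walk the sorted word run by run; ported as recursion consuming each run via takeWhile/dropWhile
def findRuns (cc : PySem.Dict Char Int) (ws : List Char) : Bool :=
  match ws with
  | [] => true
  | ch :: rest =>
    let run := rest.takeWhile (· == ch)
    if ((run.length : Int) + 1 > cc.getD ch 0) then false
    else findRuns cc (rest.dropWhile (· == ch))
termination_by ws.length
decreasing_by
  simp only [List.length_cons]
  exact Nat.lt_succ_of_le (List.length_dropWhile_le _ _)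

def find_alt (dictionary : List String) (charset : String) : List String :=
  let available := PySem.Dict.counter charset.toList
  dictionary.foldl (fun result word =>
    let ws := PySem.List.sorted word.toList (fun x => x) false
    if findRuns available ws then result ++ [word] else result) []

-- ===== PRECONDITION & SPEC =====
def Spec_find (dictionary : List String) (charset : String) (out : List String) : Prop := out = find_alt dictionary charset
instance (dictionary : List String) (charset : String) (out : List String) : Decidable (Spec_find dictionary charset out) := by unfold Spec_find; infer_instance

-- ===== CLAIM (what is proved, stated in full; the proofs are below) =====
def Claim_equal_find : Prop := ∀ (dictionary : List String) (charset : String), Dom_find dictionary charset → Spec_find dictionary charset (find dictionary charset)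

-- ===== LEMMAS AND PROOFS =====

-- A's inner loop checks every key
theorem findCheckKeys_iff (wc cc : PySem.Dict Char Int) (ks : List Char) :
    findCheckKeys wc cc ks = true ↔ ∀ ch ∈ ks, wc.getD ch 0 ≤ cc.getD ch 0 := by
  induction ks with
  | nil => simp [findCheckKeys]
  | cons ch rest ih =>
    simp only [findCheckKeys, List.mem_cons]
    split_ifs with h
    · simp only [false_iff]
      intro hall
      exact absurd (hall ch (Or.inl rfl)) (by omega)
    · rw [ih]
      constructor
      · rintro hall x (rfl | hx)
        · omega
        · exact hall x hx
      · intro hall x hx; exact hall x (Or.inr hx)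

-- on a ≤-sorted list, no occurrence of the head survives dropWhile (· == head)
theorem not_mem_dropWhile_eq (ch : Char) : ∀ rest : List Char, rest.Pairwise (· ≤ ·) →
    (∀ x ∈ rest, ch ≤ x) → ch ∉ rest.dropWhile (· == ch)
  | [], _, _ => by simp
  | h :: t, hp, hle => by
    rw [List.dropWhile_cons]
    by_cases hh : h = ch
    · subst hh
      simp only [beq_self_eq_true, if_true]
      exact not_mem_dropWhile_eq h t (List.pairwise_cons.mp hp).2
        (fun x hx => hle x (List.mem_cons_of_mem _ hx))
    · have hb : (h == ch) = false := beq_eq_false_iff_ne.mpr hh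
      simp only [hb, Bool.false_eq_true, if_false]
      intro hmem
      have hlt : ch < h := lt_of_le_of_ne (hle h List.mem_cons_self) (Ne.symm hh)
      rcases List.mem_cons.mp hmem with heq | hmem'
      · exact hh heq.symm
      · exact absurd hlt (not_lt.mpr ((List.pairwise_cons.mp hp).1 ch hmem'))

-- run-by-run check on a ≤-sorted list ⇔ every character's count fits
theorem findRuns_iff (cc : PySem.Dict Char Int) :
    ∀ ws : List Char, ws.Pairwise (· ≤ ·) →
      (findRuns cc ws = true ↔ ∀ ch ∈ ws, (ws.count ch : Int) ≤ cc.getD ch 0)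
  | [], _ => by simp [findRuns]
  | ch :: rest, hp => by
    have hpc := List.pairwise_cons.mp hp
    have hsplit : rest.takeWhile (· == ch) ++ rest.dropWhile (· == ch) = rest :=
      List.takeWhile_append_dropWhile
    have hrunall : ∀ x ∈ rest.takeWhile (· == ch), x = ch := by
      intro x hx
      have hpx := List.mem_takeWhile_imp (p := fun y => y == ch) hx
      exact eq_of_beq hpx
    have hnotmem : ch ∉ rest.dropWhile (· == ch) :=
      not_mem_dropWhile_eq ch rest hpc.2 hpc.1
    have hdsub : (rest.dropWhile (· == ch)).Sublist rest := List.dropWhile_sublist _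
    have hpd : (rest.dropWhile (· == ch)).Pairwise (· ≤ ·) := hpc.2.sublist hdsub
    have hrsplit : ∀ y : Char, rest.count y
        = (rest.takeWhile (· == ch)).count y + (rest.dropWhile (· == ch)).count y := by
      intro y
      conv_lhs => rw [← hsplit]
      rw [List.count_append]
    -- count of ch in the whole list is the run length + 1
    have hcnt : (ch :: rest).count ch = (rest.takeWhile (· == ch)).length + 1 := by
      have h1 : (rest.takeWhile (· == ch)).count ch = (rest.takeWhile (· == ch)).length :=
        List.count_eq_length.mpr (fun b hb => by rw [hrunall b hb])
      have h2 : (rest.dropWhile (· == ch)).count ch = 0 := List.count_eq_zero.mpr hnotmem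
      have h3 := hrsplit ch
      rw [List.count_cons_self]
      omega
    -- count of any other character is its count in the dropped part
    have hcnt' : ∀ x, x ≠ ch → (ch :: rest).count x = (rest.dropWhile (· == ch)).count x := by
      intro x hx
      have h1 : (rest.takeWhile (· == ch)).count x = 0 :=
        List.count_eq_zero.mpr (fun hmem => hx (hrunall x hmem))
      have h3 := hrsplit x
      rw [List.count_cons_of_ne (Ne.symm hx)]
      omega
    rw [findRuns]
    split_ifs with hgt
    · simp only [false_iff]
      intro hall
      have := hall ch List.mem_cons_self
      rw [hcnt] at this
      omega
    · rw [findRuns_iff cc (rest.dropWhile (· == ch)) hpd]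
      constructor
      · intro hall x hx
        by_cases hxc : x = ch
        · subst hxc; rw [hcnt]; push_cast; omega
        · rcases List.mem_cons.mp hx with heq | hxr
          · exact absurd heq hxc
          · rw [← hsplit, List.mem_append] at hxr
            rcases hxr with hxt | hxd
            · exact absurd (hrunall x hxt) hxc
            · rw [hcnt' x hxc]
              exact hall x hxd
      · intro hall x hx
        have hxws : x ∈ ch :: rest := List.mem_cons_of_mem _ (hdsub.subset hx)
        have hcle : (rest.dropWhile (· == ch)).count x ≤ (ch :: rest).count x :=
          (hdsub.cons ch).subperm.count_le x
        have := hall x hxws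
        omega
termination_by ws => ws.length
decreasing_by
  simp only [List.length_cons]
  exact Nat.lt_succ_of_le (List.length_dropWhile_le _ _)

-- the per-word tests agree
theorem find_valid_eq (word charset : String) :
    findCheckKeys (PySem.Dict.counter word.toList) (PySem.Dict.counter charset.toList)
        (PySem.Dict.counter word.toList).keys
      = findRuns (PySem.Dict.counter charset.toList)
          (PySem.List.sorted word.toList (fun x => x) false) := by
  have hw : (PySem.List.sorted word.toList (fun x => x) false).Perm word.toList :=
    PySem.List.sorted_perm _ _ _
  have hwp : (PySem.List.sorted word.toList (fun x => x) false).Pairwise (· ≤ ·) := by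
    simpa using PySem.List.sorted_pairwise word.toList (fun x => x)
  rw [Bool.eq_iff_iff, findCheckKeys_iff, findRuns_iff _ _ hwp]
  constructor
  · intro hall x hx
    have hx' : x ∈ word.toList := hw.mem_iff.mp hx
    have := hall x (by rw [PySem.Dict.keys_counter]; exact (PySem.Set.mem_ofList _ _).mpr hx')
    rw [PySem.Dict.getD_counter, PySem.Dict.getD_counter] at this
    rw [hw.count_eq, PySem.Dict.getD_counter]
    omega
  · intro hall ch hch
    have hch' : ch ∈ word.toList := by
      rw [PySem.Dict.keys_counter] at hch
      exact (PySem.Set.mem_ofList _ _).mp hch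
    have := hall ch (hw.mem_iff.mpr hch')
    rw [hw.count_eq, PySem.Dict.getD_counter] at this
    rw [PySem.Dict.getD_counter, PySem.Dict.getD_counter]
    omega

theorem find_fold_eq (dictionary : List String) (charset : String) (acc : List String) :
    dictionary.foldl (fun result word =>
      let word_count := PySem.Dict.counter word.toList
      let valid := findCheckKeys word_count (PySem.Dict.counter charset.toList) word_count.keys
      if valid then result ++ [word] else result) acc
    = dictionary.foldl (fun result word =>
      let ws := PySem.List.sorted word.toList (fun x => x) false
      if findRuns (PySem.Dict.counter charset.toList) ws then result ++ [word] else result) acc := by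
  induction dictionary generalizing acc with
  | nil => rfl
  | cons w rest ih =>
    simp only [List.foldl_cons]
    rw [find_valid_eq w charset]
    exact ih _

-- ===== VERDICT (by name: the statement is the Claim_ definition above) =====
theorem find_spec : Claim_equal_find := by
  intro dictionary charset _
  unfold Spec_find find find_alt
  exact find_fold_eq dictionary charset []
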